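-- pv_equiv track=rewrite | github.com/sangjun97/algorithm | 프로그래머스/lv1/12917. 문자열 내림차순으로 배치하기/문자열 내림차순으로 배치하기.py | solution
-- ===== SOURCE A (Python) =====
-- def solution(s):
--     answer = ''
--     up=[]
--     for i in s:
--         if i.isupper():
--             up.append(i)
--             s=s.replace(i,'')
--     answer=''.join(sorted(s,reverse=True)+sorted(up,reverse=True))
--     return answer
-- ===== SOURCE B (Python) =====
-- def solution(s):
--     # One keyed sort replaces the partition + two sorts: non-uppercase chars
--     # (isupper() False) sort before uppercase ones, each group in descending ord.
--     return ''.join(sorted(s, key=lambda c: (c.isupper(), -ord(c))))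
-- ===== Notes on version B (the rewrite author's own statement) =====
-- stated objective: idiomatic
-- what changed: Replaces the loop that partitions uppercase chars while repeatedly calling str.replace, followed by two separate sorts and a concatenation, with a single stable sort of the whole string under the composite key (c.isupper(), -ord(c)).
import Mathlib
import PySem

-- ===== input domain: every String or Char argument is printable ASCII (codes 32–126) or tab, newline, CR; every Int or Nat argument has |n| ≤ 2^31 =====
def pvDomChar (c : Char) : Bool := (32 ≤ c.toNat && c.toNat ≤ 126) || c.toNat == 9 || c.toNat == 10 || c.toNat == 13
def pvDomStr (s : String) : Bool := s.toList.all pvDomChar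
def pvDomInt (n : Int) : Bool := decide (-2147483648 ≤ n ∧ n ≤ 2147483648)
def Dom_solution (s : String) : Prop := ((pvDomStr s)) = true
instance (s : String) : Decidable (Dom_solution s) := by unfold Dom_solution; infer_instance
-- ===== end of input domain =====

-- B replaces A's partition-loop (with repeated str.replace) + two sorts by one stable keyed sort of the whole string (idiomatic).


-- ===== PORT A =====
-- the loop: for i in (the original) s: if i.isupper(): up.append(i); s = s.replace(i, '')
def solutionStep (acc : List Char × String) (i : Char) : List Char × String :=
  if PySem.Chars.isupper i then
    (acc.1 ++ [i], PySem.Str.replace acc.2 (String.singleton i) "")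
  else acc

def solution (s : String) : String :=
  -- answer = ''.join(sorted(s, reverse=True) + sorted(up, reverse=True))
  String.ofList (PySem.List.sorted (s.toList.foldl solutionStep ([], s)).2.toList (fun c => c) true ++
                 PySem.List.sorted (s.toList.foldl solutionStep ([], s)).1 (fun c => c) true)

-- ===== PORT B =====
-- return ''.join(sorted(s, key=lambda c: (c.isupper(), -ord(c))))
def solution_alt (s : String) : String :=
  String.ofList (PySem.List.sorted2 s.toList
    (fun c => PySem.Chars.isupper c) (fun c => -(c.toNat : Int)) false)

-- ===== PRECONDITION & SPEC =====
def Spec_solution (s : String) (out : String) : Prop := out = solution_alt s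
instance (s : String) (out : String) : Decidable (Spec_solution s out) := by unfold Spec_solution; infer_instance

-- ===== CLAIM (what is proved, stated in full; the proofs are below) =====
def Claim_equal_solution : Prop := ∀ (s : String), Dom_solution s → Spec_solution s (solution s)

-- ===== LEMMAS AND PROOFS =====

-- single Int key realising Python's tuple key (c.isupper(), -ord(c)) lexicographically
def pvKey (c : Char) : Int := (if PySem.Chars.isupper c then 4294967296 else 0) - (c.toNat : Int)

theorem pvKey_injective : Function.Injective pvKey := by
  intro a b h
  have ha : a.toNat < 4294967296 := a.val.toNat_lt_size
  have hb : b.toNat < 4294967296 := b.val.toNat_lt_size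
  have : a.toNat = b.toNat := by
    unfold pvKey at h; split_ifs at h <;> omega
  exact Char.ext (UInt32.toNat_inj.mp this)

-- s.replace(i, '') on a single character deletes every occurrence of that character
theorem replace_go_single (i : Char) :
    ∀ (fuel : Nat) (l acc : List Char), l.length ≤ fuel →
      PySem.Chars.replace.go [i] [] fuel l acc = acc.reverse ++ l.filter (fun c => c != i) := by
  intro fuel
  induction fuel with
  | zero =>
    intro l acc h
    have : l = [] := List.length_eq_zero_iff.mp (Nat.le_zero.mp h)
    subst this; simp [PySem.Chars.replace.go]
  | succ n ih =>
    intro l acc h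
    cases l with
    | nil => simp [PySem.Chars.replace.go]
    | cons c t =>
      simp only [PySem.Chars.replace.go, List.isPrefixOf, Bool.and_true]
      by_cases hc : i = c
      · subst hc
        simp only [BEq.rfl, if_pos, List.length_cons, List.length_nil, Nat.zero_add,
          List.drop_succ_cons, List.drop_zero, List.reverse_nil, List.nil_append]
        rw [ih t acc (by simpa using h)]
        simp
      · have hne : (i == c) = false := by simp [hc]
        simp only [hne, if_neg, Bool.false_eq_true, not_false_iff]
        rw [ih t (c :: acc) (by simpa using h)]
        have : (c != i) = true := by simp [bne, Ne.symm hc]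
        simp [this]

theorem replace_single (cs : List Char) (i : Char) :
    PySem.Chars.replace cs [i] [] = cs.filter (fun c => c != i) := by
  simp only [PySem.Chars.replace, List.isEmpty_cons, if_neg, Bool.false_eq_true, not_false_iff]
  exact replace_go_single i cs.length cs [] le_rfl

-- invariant of A's loop: up accumulates the uppercase occurrences in order,
-- and the string has every uppercase character seen so far deleted
theorem loop_invariant (l : List Char) : ∀ (up : List Char) (cur : String),
    (l.foldl solutionStep (up, cur)).1 = up ++ l.filter PySem.Chars.isupper ∧
    (l.foldl solutionStep (up, cur)).2.toList =
      (l.filter PySem.Chars.isupper).foldl (fun cs u => cs.filter (fun c => c != u)) cur.toList := by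
  induction l with
  | nil => intro up cur; simp
  | cons i t ih =>
    intro up cur
    by_cases hi : PySem.Chars.isupper i
    · have step : solutionStep (up, cur) i
          = (up ++ [i], PySem.Str.replace cur (String.singleton i) "") := by
        simp [solutionStep, hi]
      have htl : (PySem.Str.replace cur (String.singleton i) "").toList
          = cur.toList.filter (fun c => c != i) := by
        rw [PySem.Str.toList_replace]
        simp [replace_single]
      obtain ⟨h1, h2⟩ := ih (up ++ [i]) (PySem.Str.replace cur (String.singleton i) "")
      refine ⟨?_, ?_⟩
      · simp only [List.foldl_cons, step, h1, List.filter_cons_of_pos hi]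
        simp
      · simp only [List.foldl_cons, step, h2, htl, List.filter_cons_of_pos hi]
    · have step : solutionStep (up, cur) i = (up, cur) := by simp [solutionStep, hi]
      obtain ⟨h1, h2⟩ := ih up cur
      refine ⟨?_, ?_⟩
      · simpa [step, List.filter_cons_of_neg (by simpa using hi)] using h1
      · simpa [step, List.filter_cons_of_neg (by simpa using hi)] using h2

-- deleting each element of us in turn is one filter by non-membership
theorem foldl_filter_ne (us : List Char) : ∀ (cs : List Char),
    us.foldl (fun cs u => cs.filter (fun c => c != u)) cs
      = cs.filter (fun c => !(us.contains c)) := by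
  induction us with
  | nil => intro cs; simp
  | cons u t ih =>
    intro cs
    simp only [List.foldl_cons, ih, List.filter_filter]
    apply List.filter_congr
    intro c _
    simp only [List.contains_cons, Bool.not_or, bne]
    rw [Bool.and_comm]

-- A's remaining string is exactly the non-uppercase characters of s
theorem final_string (s : String) :
    (s.toList.foldl solutionStep ([], s)).2.toList
      = s.toList.filter (fun c => !PySem.Chars.isupper c) := by
  obtain ⟨-, h2⟩ := loop_invariant s.toList ([] : List Char) s
  rw [h2, foldl_filter_ne]
  apply List.filter_congr
  intro c hc
  by_cases hup : PySem.Chars.isupper c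
  · have hmem : c ∈ s.toList.filter PySem.Chars.isupper := List.mem_filter.mpr ⟨hc, hup⟩
    simp [hmem, hup]
  · have hmem : c ∉ s.toList.filter PySem.Chars.isupper :=
      fun h => hup (List.mem_filter.mp h).2
    simp [hmem, hup]

-- Char order transfers to pvKey (descending, within one isupper-class)
theorem pvKey_le_of_ge {a b : Char} (hf : PySem.Chars.isupper a = PySem.Chars.isupper b)
    (h : b ≤ a) : pvKey a ≤ pvKey b := by
  have : b.toNat ≤ a.toNat := by
    simpa [Char.le_def, UInt32.le_iff_toNat_le] using h
  unfold pvKey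
  rw [hf]
  split_ifs <;> omega

-- A's concatenation is pairwise nondecreasing in pvKey
theorem pairwise_A (s : String) :
    List.Pairwise (fun a b => pvKey a ≤ pvKey b)
      (PySem.List.sorted (s.toList.filter (fun c => !PySem.Chars.isupper c)) (fun c => c) true ++
       PySem.List.sorted (s.toList.filter PySem.Chars.isupper) (fun c => c) true) := by
  rw [List.pairwise_append]
  refine ⟨?_, ?_, ?_⟩
  · refine List.Pairwise.imp_of_mem ?_
      (PySem.List.sorted_pairwise_rev (s.toList.filter (fun c => !PySem.Chars.isupper c)) (fun c => c))
    intro a b ha hb hba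
    have ha2 : PySem.Chars.isupper a = false := by
      simpa using (List.mem_filter.mp ((PySem.List.mem_sorted _ _ _ _).mp ha)).2
    have hb2 : PySem.Chars.isupper b = false := by
      simpa using (List.mem_filter.mp ((PySem.List.mem_sorted _ _ _ _).mp hb)).2
    exact pvKey_le_of_ge (ha2.trans hb2.symm) hba
  · refine List.Pairwise.imp_of_mem ?_
      (PySem.List.sorted_pairwise_rev (s.toList.filter PySem.Chars.isupper) (fun c => c))
    intro a b ha hb hba
    have ha2 := (List.mem_filter.mp ((PySem.List.mem_sorted _ _ _ _).mp ha)).2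
    have hb2 := (List.mem_filter.mp ((PySem.List.mem_sorted _ _ _ _).mp hb)).2
    exact pvKey_le_of_ge (ha2.trans hb2.symm) hba
  · intro a ha b hb
    have ha2 : PySem.Chars.isupper a = false := by
      simpa using (List.mem_filter.mp ((PySem.List.mem_sorted _ _ _ _).mp ha)).2
    have hb2 := (List.mem_filter.mp ((PySem.List.mem_sorted _ _ _ _).mp hb)).2
    have hbn : b.toNat < 4294967296 := b.val.toNat_lt_size
    unfold pvKey
    simp only [ha2, hb2, Bool.false_eq_true, if_false, if_true]
    omega

-- Python's comparator for the tuple key (c.isupper(), -ord(c)) is pvKey's comparator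
theorem before_eq (a b : Char) :
    (decide (PySem.Chars.isupper a < PySem.Chars.isupper b) ||
      (!decide (PySem.Chars.isupper b < PySem.Chars.isupper a) &&
        decide (-(a.toNat : Int) < -(b.toNat : Int))))
    = decide (pvKey a < pvKey b) := by
  have ha : a.toNat < 4294967296 := a.val.toNat_lt_size
  have hb : b.toNat < 4294967296 := b.val.toNat_lt_size
  rw [Bool.eq_iff_iff]
  simp only [Bool.or_eq_true, Bool.and_eq_true, Bool.not_eq_true', decide_eq_true_eq,
    decide_eq_false_iff_not, Bool.lt_iff, pvKey]
  by_cases hA : PySem.Chars.isupper a <;> by_cases hB : PySem.Chars.isupper b <;>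
    simp [hA, hB] <;> omega

-- the single keyed sort is the sort by pvKey
theorem sorted2_eq_sorted_pvKey (xs : List Char) :
    PySem.List.sorted2 xs (fun c => PySem.Chars.isupper c) (fun c => -(c.toNat : Int)) false
      = PySem.List.sorted xs pvKey false := by
  rw [PySem.List.sorted_eq_foldl_insertBy]
  show List.foldl (fun acc x => PySem.List.insertBy
      (fun a b => decide (PySem.Chars.isupper a < PySem.Chars.isupper b) ||
        (!decide (PySem.Chars.isupper b < PySem.Chars.isupper a) &&
          decide (-(a.toNat : Int) < -(b.toNat : Int)))) x acc) [] xs = _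
  congr 1
  funext acc x
  congr 1
  funext a b
  exact before_eq a b

-- the two output character lists coincide
theorem lists_eq (s : String) :
    PySem.List.sorted (s.toList.foldl solutionStep ([], s)).2.toList (fun c => c) true ++
      PySem.List.sorted (s.toList.foldl solutionStep ([], s)).1 (fun c => c) true
    = PySem.List.sorted2 s.toList (fun c => PySem.Chars.isupper c) (fun c => -(c.toNat : Int)) false := by
  have hup := (loop_invariant s.toList ([] : List Char) s).1
  rw [final_string s, hup, List.nil_append, sorted2_eq_sorted_pvKey]
  have permA : (PySem.List.sorted (s.toList.filter (fun c => !PySem.Chars.isupper c)) (fun c => c) true ++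
      PySem.List.sorted (s.toList.filter PySem.Chars.isupper) (fun c => c) true).Perm s.toList := by
    refine ((PySem.List.sorted_perm _ _ _).append (PySem.List.sorted_perm _ _ _)).trans ?_
    exact List.perm_append_comm.trans (List.filter_append_perm PySem.Chars.isupper s.toList)
  have permB : (PySem.List.sorted s.toList pvKey false).Perm s.toList :=
    PySem.List.sorted_perm _ _ _
  exact PySem.List.eq_of_perm_of_pairwise_le_of_injective pvKey pvKey_injective
    (permA.trans permB.symm) (pairwise_A s) (PySem.List.sorted_pairwise s.toList pvKey)

-- ===== VERDICT (by name: the statement is the Claim_ definition above) =====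
theorem solution_spec : Claim_equal_solution := by
  intro s _
  unfold Spec_solution solution solution_alt
  rw [lists_eq s]
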